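-- pv_equiv track=rewrite | github.com/joanvelja/Natural-Language-Processing-1 | 2/logs/experiments_final.py | extract_subtrees
-- ===== SOURCE A (Python) =====
-- def extract_subtrees(treestring):
--   """Given a treestring, returns a list of subtreestrings."""
--   subtrees = [treestring]
--   counter = 0 # add 1 for every '(', subtract 1 for every ')'
--   for i in range(1, len(treestring)):
--     if treestring[i] == '(':
--       counter += 1
--       if counter == 1:
--         begin = i # found first position of new child
--     elif treestring[i] == ')':
--       counter -= 1
--       if counter == -1:
--         return subtrees # no more subtrees
--       if counter == 0:
--         end = i + 1 # found final position of new child, add subtrees of child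
--         subtrees.extend(extract_subtrees(treestring[begin:end]))
--   return subtrees
-- ===== SOURCE B (Python) =====
-- def extract_subtrees(treestring):
--   """Given a treestring, returns a list of subtreestrings."""
--   stack = []   # open parenthesis positions (index >= 1) with their slot in spans
--   spans = []   # one placeholder per open, filled with (begin, end) at its close
--   for i in range(1, len(treestring)):
--     c = treestring[i]
--     if c == '(':
--       stack.append((i, len(spans)))
--       spans.append(None)
--     elif c == ')':
--       if not stack:
--         break  # stray top-level closer: no more subtrees
--       b, slot = stack.pop()
--       spans[slot] = (b, i + 1)
--   if stack:
--     spans = spans[:stack[0][1]]  # drop everything inside an unclosed subtree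
--   out = [treestring]
--   for sp in spans:
--     if sp is not None:
--       b, e = sp
--       out.append(treestring[b:e])
--   return out
-- ===== Notes on version B (the rewrite author's own statement) =====
-- stated objective: alternative
-- what changed: A recursively re-scans every child substring it extracts; B makes a single left-to-right pass with an explicit stack of open-parenthesis positions, reserving a result slot at each opening parenthesis so the recorded spans already come out in A's preorder.
import Mathlib
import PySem

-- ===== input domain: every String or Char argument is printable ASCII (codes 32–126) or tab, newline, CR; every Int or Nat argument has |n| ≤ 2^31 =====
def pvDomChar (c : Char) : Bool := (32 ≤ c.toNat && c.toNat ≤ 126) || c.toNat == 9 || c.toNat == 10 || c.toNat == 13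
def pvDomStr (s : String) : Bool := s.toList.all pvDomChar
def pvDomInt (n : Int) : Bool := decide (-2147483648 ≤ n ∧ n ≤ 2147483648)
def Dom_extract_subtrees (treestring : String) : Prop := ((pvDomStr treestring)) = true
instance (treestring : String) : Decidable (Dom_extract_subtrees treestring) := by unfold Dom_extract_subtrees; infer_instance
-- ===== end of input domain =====

-- B replaces A's recursive rescan of every child substring by a single left-to-right
-- pass with an explicit stack of open-parenthesis positions, recording each subtree span in a
-- placeholder slot reserved at its opening parenthesis (hence already in preorder).

-- ===== PORT A =====
-- literal port of A; the for-loop with early 'return' is the structural recursion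
-- loopA over the index i; the recursion on the child substring gets a fuel argument
-- (a guard making the same computation total: fuel = length + 1 always suffices).
-- Python s[b:e] with 0 ≤ b, e is exactly (s.drop b).take (e - b).
mutual
def extractA : Nat → List Char → List (List Char)
  | 0, s => [s]
  | f+1, s => loopA f s 1 0 0 [s]
termination_by f s => ((f : Nat), (0 : Nat))

def loopA (f : Nat) (s : List Char) (i : Nat) (counter : Int) (beg : Nat)
    (acc : List (List Char)) : List (List Char) :=
  if h : i < s.length then
    if s[i] = '(' then
      loopA f s (i+1) (counter + 1) (if counter + 1 = 1 then i else beg) acc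
    else if s[i] = ')' then
      if counter - 1 = -1 then acc
      else if counter - 1 = 0 then
        loopA f s (i+1) (counter - 1) beg
          (acc ++ extractA f ((s.drop beg).take (i + 1 - beg)))
      else loopA f s (i+1) (counter - 1) beg acc
    else loopA f s (i+1) counter beg acc
  else acc
termination_by (f, s.length + 1 - i)
decreasing_by all_goals simp_wf <;> first
  | (apply Prod.Lex.left; omega)
  | (apply Prod.Lex.right; omega)
end

def extract_subtrees (treestring : String) : List String :=
  (extractA (treestring.toList.length + 1) treestring.toList).map (fun l => String.ofList l)

-- ===== PORT B =====
-- literal port of Source B: one pass, stack of (open position, slot); Python's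
-- stack.append/pop at the END of its list are cons/head here, so Python's
-- stack[0] (the bottom) is getLast? here.
def loopB (s : List Char) (i : Nat) (stack : List (Nat × Nat))
    (spans : List (Option (Nat × Nat))) : List (Nat × Nat) × List (Option (Nat × Nat)) :=
  if h : i < s.length then
    if s[i] = '(' then
      loopB s (i+1) ((i, spans.length) :: stack) (spans ++ [none])
    else if s[i] = ')' then
      match stack with
      | [] => ([], spans)                                   -- break
      | (b, slot) :: st => loopB s (i+1) st (spans.set slot (some (b, i + 1)))
    else loopB s (i+1) stack spans
  else (stack, spans)
termination_by s.length - i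

def extract_subtrees_alt (treestring : String) : List String :=
  let s := treestring.toList
  let r := loopB s 1 [] []
  let spans := match r.1.getLast? with
    | some bs => r.2.take bs.2
    | none => r.2
  treestring :: spans.filterMap
    (fun sp => sp.map (fun be => String.ofList ((s.drop be.1).take (be.2 - be.1))))

-- ===== PRECONDITION & SPEC =====
def Spec_extract_subtrees (treestring : String) (out : List String) : Prop := out = extract_subtrees_alt treestring
instance (treestring : String) (out : List String) : Decidable (Spec_extract_subtrees treestring out) := by unfold Spec_extract_subtrees; infer_instance

-- ===== CLAIM (what is proved, stated in full; the proofs are below) =====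
def Claim_equal_extract_subtrees : Prop := ∀ (treestring : String), Dom_extract_subtrees treestring → Spec_extract_subtrees treestring (extract_subtrees treestring)

-- ===== LEMMAS AND PROOFS =====

-- proof-side instrumented copy of loopB: additionally reports whether the scan
-- ended with 'break' (some r = index of the breaking ')') or ran off the end.
def loopB2 (s : List Char) (i : Nat) (stack : List (Nat × Nat))
    (spans : List (Option (Nat × Nat))) :
    List (Nat × Nat) × List (Option (Nat × Nat)) × Option Nat :=
  if h : i < s.length then
    if s[i] = '(' then
      loopB2 s (i+1) ((i, spans.length) :: stack) (spans ++ [none])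
    else if s[i] = ')' then
      match stack with
      | [] => ([], spans, some i)
      | (b, slot) :: st => loopB2 s (i+1) st (spans.set slot (some (b, i + 1)))
    else loopB2 s (i+1) stack spans
  else (stack, spans, none)
termination_by s.length - i

def liftSt (b k : Nat) (st : List (Nat × Nat)) : List (Nat × Nat) :=
  st.map (fun p => (p.1 + b, p.2 + k))

def liftSp (b : Nat) (sp : List (Option (Nat × Nat))) : List (Option (Nat × Nat)) :=
  sp.map (Option.map (fun be => (be.1 + b, be.2 + b)))

def strsS (s : List Char) (spans : List (Option (Nat × Nat))) : List (List Char) :=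
  spans.filterMap (fun sp => sp.map (fun be => (s.drop be.1).take (be.2 - be.1)))

def postSpans (r : List (Nat × Nat) × List (Option (Nat × Nat)) × Option Nat) :
    List (Option (Nat × Nat)) :=
  match r.1.getLast? with
  | some bs => r.2.1.take bs.2
  | none => r.2.1

def altCore (s : List Char) : List (List Char) :=
  s :: strsS s (postSpans (loopB2 s 1 [] []))

lemma loopB_eq_B2 (s : List Char) (i : Nat) (st : List (Nat × Nat))
    (sp : List (Option (Nat × Nat))) :
    loopB s i st sp = ((loopB2 s i st sp).1, (loopB2 s i st sp).2.1) := by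
  fun_induction loopB2 s i st sp <;>
    (unfold loopB; simp_all)

-- a break happens only with an empty stack, at a position ≥ i
lemma loopB2_break (s : List Char) (i : Nat) (st : List (Nat × Nat))
    (sp : List (Option (Nat × Nat))) (stc : List (Nat × Nat))
    (spc : List (Option (Nat × Nat))) (r : Nat)
    (h : loopB2 s i st sp = (stc, spc, some r)) : stc = [] ∧ i ≤ r ∧ r < s.length := by
  fun_induction loopB2 s i st sp <;> simp_all <;> omega

-- every span present after a run that broke at r was present before or ends ≤ r
lemma loopB2_bounds (s : List Char) (i : Nat) (st : List (Nat × Nat))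
    (sp : List (Option (Nat × Nat))) (stc : List (Nat × Nat))
    (spc : List (Option (Nat × Nat))) (r : Nat)
    (h : loopB2 s i st sp = (stc, spc, some r)) :
    ∀ be : Nat × Nat, some be ∈ spc → some be ∈ sp ∨ be.2 ≤ r := by
  fun_induction loopB2 s i st sp generalizing stc spc r <;> simp_all
  case case3 =>
    rename_i i spans hi hc b slot st ih
    intro a bb hmem
    obtain ⟨hst, hir, -⟩ := loopB2_break _ _ _ _ _ _ _ h
    rcases ih a bb hmem with h' | h'
    · rcases List.mem_or_eq_of_mem_set h' with h'' | h''
      · exact Or.inl h''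
      · injection h'' with h''; injection h'' with h1 h2; right; omega
    · exact Or.inr h'

-- a run that breaks at r only reads chars at indices ≤ r, so it is unchanged on take m, r < m
lemma loopB2_take (s : List Char) (m : Nat) :
    ∀ i st sp stc spc r, loopB2 s i st sp = (stc, spc, some r) → r < m →
    loopB2 (s.take m) i st sp = (stc, spc, some r) := by
  intro i st sp stc spc r h hrm
  fun_induction loopB2 s i st sp generalizing stc spc r
  case case1 i stack spans hi hc ih =>
    obtain ⟨-, hir, -⟩ := loopB2_break _ _ _ _ _ _ _ h
    rw [loopB2.eq_def]
    rw [dif_pos (by simp; omega : i < (List.take m s).length)]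
    rw [if_pos (by rw [List.getElem_take]; exact hc)]
    exact ih _ _ _ h hrm
  case case2 i spans hi hnc hc =>
    simp only [Prod.mk.injEq] at h
    obtain ⟨e1, e2, e3⟩ := h
    have e3 : r = i := by simpa using e3.symm
    rw [loopB2.eq_def]
    rw [dif_pos (by simp; omega : i < (List.take m s).length)]
    rw [if_neg (by rw [List.getElem_take]; exact hnc)]
    rw [if_pos (by rw [List.getElem_take]; exact hc)]
    simp [← e1, ← e2, e3]
  case case3 i spans hi hnc hc b slot st ih =>
    obtain ⟨-, hir, -⟩ := loopB2_break _ _ _ _ _ _ _ h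
    rw [loopB2.eq_def]
    rw [dif_pos (by simp; omega : i < (List.take m s).length)]
    rw [if_neg (by rw [List.getElem_take]; exact hnc)]
    rw [if_pos (by rw [List.getElem_take]; exact hc)]
    exact ih _ _ _ h hrm
  case case4 i stack spans hi hnc hnc2 ih =>
    obtain ⟨-, hir, -⟩ := loopB2_break _ _ _ _ _ _ _ h
    rw [loopB2.eq_def]
    rw [dif_pos (by simp; omega : i < (List.take m s).length)]
    rw [if_neg (by rw [List.getElem_take]; exact hnc)]
    rw [if_neg (by rw [List.getElem_take]; exact hnc2)]
    exact ih _ _ _ h hrm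
  case case5 i stack spans hi =>
    simp at h

-- window lemma: the scan of s inside an open subtree rooted at position b, with k0 = |D|
-- slots already allocated, mirrors the scan of the suffix s.drop b shifted by (b, k0+1);
-- in parallel, A's loop inside that subtree only tracks the depth and is otherwise inert
-- until the subtree closes (counter back to 0) or the string ends.
lemma set_append_add {α : Type} (l₁ : List α) (n : Nat) (v : α) (l₂ : List α) :
    (l₁ ++ l₂).set (l₁.length + n) v = l₁ ++ l₂.set n v := by
  induction l₁ with
  | nil => simp
  | cons a tl ih =>
      have h1 : tl.length + 1 + n = (tl.length + n) + 1 := by omega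
      simp only [List.cons_append, List.length_cons, h1, List.set_cons_succ, ih]

lemma window (s : List Char) (f : Nat) (b k0 : Nat) (acc : List (List Char))
    (D : List (Option (Nat × Nat))) (hD : D.length = k0) :
    ∀ n j st' sp' stc spc brk, 1 ≤ j → (s.drop b).length - j ≤ n →
    loopB2 (s.drop b) j st' sp' = (stc, spc, brk) →
    ((brk = none →
        loopA f s (b + j) ((st'.length : Int) + 1) b acc = acc ∧
        loopB2 s (b + j) (liftSt b (k0+1) st' ++ [(b, k0)]) (D ++ none :: liftSp b sp')
          = (liftSt b (k0+1) stc ++ [(b, k0)], D ++ none :: liftSp b spc, none)) ∧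
     (∀ r, brk = some r →
        loopA f s (b + j) ((st'.length : Int) + 1) b acc
          = loopA f s (b + r + 1) 0 b
              (acc ++ extractA f ((s.drop b).take (b + r + 1 - b))) ∧
        loopB2 s (b + j) (liftSt b (k0+1) st' ++ [(b, k0)]) (D ++ none :: liftSp b sp')
          = loopB2 s (b + r + 1) [] (D ++ some (b, b + r + 1) :: liftSp b spc))) := by
  intro n
  induction n with
  | zero =>
    intro j st' sp' stc spc brk hj hn hC
    have hge : ¬ j < (s.drop b).length := by omega
    have hbge : ¬ b + j < s.length := by simp only [List.length_drop] at hge; omega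
    rw [loopB2.eq_def, dif_neg hge] at hC
    obtain ⟨rfl, rfl, rfl⟩ := Prod.mk.injEq .. ▸ hC
    refine ⟨fun _ => ⟨?_, ?_⟩, fun r hr => by cases hr⟩
    · rw [loopA.eq_def, dif_neg hbge]
    · rw [loopB2.eq_def, dif_neg hbge]
  | succ n ih =>
    intro j st' sp' stc spc brk hj hn hC
    by_cases hlt : j < (s.drop b).length
    · have hbl : b + j < s.length := by simp only [List.length_drop] at hlt; omega
      have hchar : (s.drop b)[j]'hlt = s[b+j]'hbl := List.getElem_drop
      rw [loopB2.eq_def, dif_pos hlt] at hC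
      rw [hchar] at hC
      by_cases hc1 : s[b+j]'hbl = '('
      · rw [if_pos hc1] at hC
        have key := ih (j+1) ((j, sp'.length) :: st') (sp' ++ [none]) stc spc brk
          (by omega) (by omega) hC
        have e1 : b + (j+1) = b + j + 1 := by omega
        have e2 : ((((j, sp'.length) :: st').length : Int) + 1) = ((st'.length : Int) + 1) + 1 := by
          simp only [List.length_cons]; push_cast; ring
        have hlen : (D ++ none :: liftSp b sp').length = k0 + 1 + sp'.length := by
          simp [liftSp, hD]; omega
        have hst : ((b+j, k0+1+sp'.length) :: (liftSt b (k0+1) st' ++ [(b,k0)]))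
            = liftSt b (k0+1) ((j, sp'.length) :: st') ++ [(b,k0)] := by
          simp [liftSt]; omega
        have hsp : (D ++ none :: liftSp b sp') ++ [none] = D ++ none :: liftSp b (sp' ++ [none]) := by
          simp [liftSp]
        rw [e1, e2] at key
        constructor
        · intro hbrk
          obtain ⟨hA, hB⟩ := key.1 hbrk
          refine ⟨?_, ?_⟩
          · rw [loopA.eq_def, dif_pos hbl, if_pos hc1, if_neg (by push_cast; omega)]
            exact hA
          · rw [loopB2.eq_def, dif_pos hbl, if_pos hc1, hlen, hst, hsp]
            exact hB
        · intro r hbrk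
          obtain ⟨hA, hB⟩ := key.2 r hbrk
          refine ⟨?_, ?_⟩
          · rw [loopA.eq_def, dif_pos hbl, if_pos hc1, if_neg (by push_cast; omega)]
            exact hA
          · rw [loopB2.eq_def, dif_pos hbl, if_pos hc1, hlen, hst, hsp]
            exact hB
      · rw [if_neg hc1] at hC
        by_cases hc2 : s[b+j]'hbl = ')'
        · rw [if_pos hc2] at hC
          cases st' with
          | nil =>
            obtain ⟨rfl, rfl, rfl⟩ := Prod.mk.injEq .. ▸ hC
            refine ⟨fun h => (by simp at h), fun r hr => ?_⟩
            obtain rfl : j = r := by simpa using hr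
            refine ⟨?_, ?_⟩
            · rw [loopA.eq_def, dif_pos hbl, if_neg hc1, if_pos hc2,
                if_neg (by norm_num), if_pos (by norm_num)]
              norm_num
            · rw [loopB2.eq_def, dif_pos hbl, if_neg hc1, if_pos hc2]
              simp only [liftSt, List.map_nil, List.nil_append]
              have hset : (D ++ none :: liftSp b sp').set k0 (some (b, b + j + 1))
                  = D ++ some (b, b + j + 1) :: liftSp b sp' := by
                have := set_append_add D 0 (some (b, b + j + 1)) (none :: liftSp b sp')
                simpa [hD] using this
              rw [hset]
          | cons hd rest =>
            obtain ⟨b', m⟩ := hd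
            have key := ih (j+1) rest (sp'.set m (some (b', j+1))) stc spc brk
              (by omega) (by omega) hC
            have e1 : b + (j+1) = b + j + 1 := by omega
            have e3 : ((((b', m) :: rest).length : Int) + 1) - 1 = (rest.length : Int) + 1 := by
              simp only [List.length_cons]; push_cast; ring
            have hset : (D ++ none :: liftSp b sp').set (m + (k0 + 1)) (some (b' + b, b + j + 1))
                = D ++ none :: liftSp b (sp'.set m (some (b', j + 1))) := by
              rw [List.append_cons D none (liftSp b sp')]
              have hidx : m + (k0 + 1) = (D ++ [none]).length + m := by simp [hD]; omega
              rw [hidx, set_append_add, ← List.append_cons]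
              have : liftSp b (sp'.set m (some (b', j + 1)))
                  = (liftSp b sp').set m (some (b' + b, (j + 1) + b)) := by
                simp [liftSp, List.map_set]
              rw [this]
              have : b + j + 1 = (j + 1) + b := by omega
              rw [this]
            rw [e1] at key
            constructor
            · intro hbrk
              obtain ⟨hA, hB⟩ := key.1 hbrk
              refine ⟨?_, ?_⟩
              · rw [loopA.eq_def, dif_pos hbl, if_neg hc1, if_pos hc2,
                  if_neg (by push_cast; omega), if_neg (by push_cast; omega), e3]
                exact hA
              · rw [loopB2.eq_def, dif_pos hbl, if_neg hc1, if_pos hc2]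
                simp only [liftSt, List.map_cons, List.cons_append]
                rw [hset]
                exact hB
            · intro r hbrk
              obtain ⟨hA, hB⟩ := key.2 r hbrk
              refine ⟨?_, ?_⟩
              · rw [loopA.eq_def, dif_pos hbl, if_neg hc1, if_pos hc2,
                  if_neg (by push_cast; omega), if_neg (by push_cast; omega), e3]
                exact hA
              · rw [loopB2.eq_def, dif_pos hbl, if_neg hc1, if_pos hc2]
                simp only [liftSt, List.map_cons, List.cons_append]
                rw [hset]
                exact hB
        · rw [if_neg hc2] at hC
          have key := ih (j+1) st' sp' stc spc brk (by omega) (by omega) hC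
          have e1 : b + (j+1) = b + j + 1 := by omega
          rw [e1] at key
          constructor
          · intro hbrk
            obtain ⟨hA, hB⟩ := key.1 hbrk
            exact ⟨by rw [loopA.eq_def, dif_pos hbl, if_neg hc1, if_neg hc2]; exact hA,
                   by rw [loopB2.eq_def, dif_pos hbl, if_neg hc1, if_neg hc2]; exact hB⟩
          · intro r hbrk
            obtain ⟨hA, hB⟩ := key.2 r hbrk
            exact ⟨by rw [loopA.eq_def, dif_pos hbl, if_neg hc1, if_neg hc2]; exact hA,
                   by rw [loopB2.eq_def, dif_pos hbl, if_neg hc1, if_neg hc2]; exact hB⟩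
    · have hbge : ¬ b + j < s.length := by simp only [List.length_drop] at hlt; omega
      rw [loopB2.eq_def, dif_neg hlt] at hC
      obtain ⟨rfl, rfl, rfl⟩ := Prod.mk.injEq .. ▸ hC
      refine ⟨fun _ => ⟨?_, ?_⟩, fun r hr => by cases hr⟩
      · rw [loopA.eq_def, dif_neg hbge]
      · rw [loopB2.eq_def, dif_neg hbge]

-- slices of s named by shifted spans are slices of the child substring
lemma strsS_shift (s : List Char) (i : Nat) {r : Nat} (spc : List (Option (Nat × Nat)))
    (hb : ∀ be : Nat × Nat, some be ∈ spc → be.2 ≤ r + 1) :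
    strsS ((s.drop i).take (r+1)) spc = strsS s (liftSp i spc) := by
  induction spc with
  | nil => rfl
  | cons hd tl ih =>
    have htl : ∀ be : Nat × Nat, some be ∈ tl → be.2 ≤ r + 1 := by
      intro be hbe; exact hb be (List.mem_cons_of_mem _ hbe)
    cases hd with
    | none => simpa [strsS, liftSp, List.filterMap_cons] using ih htl
    | some be =>
      have hbe : be.2 ≤ r + 1 := hb be (List.mem_cons_self ..)
      have ihtl := ih htl
      simp only [strsS, liftSp, List.filterMap_cons, List.map_cons, Option.map_some] at ihtl ⊢
      rw [ihtl]
      congr 1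
      rw [List.drop_take, List.drop_drop, List.take_take]
      have e2 : min (be.2 - be.1) (r + 1 - be.1) = be.2 - be.1 := by omega
      have e3 : be.2 + i - (be.1 + i) = be.2 - be.1 := by omega
      have e4 : i + be.1 = be.1 + i := by omega
      rw [e2, e3, e4]

-- main loop correspondence at nesting depth 0
lemma mainLoop (s : List Char) (f : Nat)
    (Hrec : ∀ ch : List Char, ch.length < s.length → extractA f ch = altCore ch) :
    ∀ n i D acc beg, 1 ≤ i → s.length - i ≤ n →
    acc = s :: strsS s D →
    loopA f s i 0 beg acc = s :: strsS s (postSpans (loopB2 s i [] D)) := by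
  intro n
  induction n with
  | zero =>
    intro i D acc beg hi hn hacc
    have hge : ¬ i < s.length := by omega
    rw [loopA.eq_def, dif_neg hge, loopB2.eq_def, dif_neg hge]
    simpa [postSpans] using hacc
  | succ n ih =>
    intro i D acc beg hi hn hacc
    by_cases hlt : i < s.length
    · by_cases hc1 : s[i] = '('
      · rw [loopA.eq_def, dif_pos hlt, if_pos hc1, if_pos (by norm_num)]
        rw [loopB2.eq_def, dif_pos hlt, if_pos hc1]
        obtain ⟨⟨stc, spc, brk⟩, hC⟩ : ∃ v, loopB2 (s.drop i) 1 [] [] = v := ⟨_, rfl⟩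
        have W := window s f i D.length acc D rfl ((s.drop i).length - 1) 1 [] [] stc spc brk
          (le_refl 1) (by omega) hC
        simp only [liftSt, liftSp, List.map_nil, List.nil_append, List.length_nil,
          Nat.cast_zero] at W
        cases brk with
        | none =>
          obtain ⟨hA, hB⟩ := W.1 rfl
          rw [hA, hB]
          unfold postSpans
          simp only [List.getLast?_concat]
          rw [List.take_left' rfl]
          exact hacc
        | some r =>
          obtain ⟨hA, hB⟩ := W.2 r rfl
          obtain ⟨-, hr1, hr2⟩ := loopB2_break _ _ _ _ _ _ _ hC
          have hstc : stc = [] := (loopB2_break _ _ _ _ _ _ _ hC).1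
          subst hstc
          have hbnd := loopB2_bounds _ _ _ _ _ _ _ hC
          have htake := loopB2_take (s.drop i) (r+1) 1 [] [] [] spc r hC (by omega)
          have hchlen : ((s.drop i).take (r+1)).length < s.length := by
            simp only [List.length_take, List.length_drop] at *
            omega
          have hrec := Hrec _ hchlen
          rw [altCore, htake] at hrec
          have hpost : postSpans ([], spc, some r) = spc := rfl
          rw [hpost] at hrec
          have hshift : strsS ((s.drop i).take (r+1)) spc = strsS s (liftSp i spc) := by
            apply strsS_shift
            intro be hbe
            rcases hbnd be hbe with h' | h'
            · simp at h'
            · omega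
          rw [hA, hB]
          have e4 : i + r + 1 - i = r + 1 := by omega
          rw [e4]
          refine ih (i + r + 1) (D ++ some (i, i + r + 1) :: liftSp i spc) _ i
            (by omega) (by omega) ?_
          rw [hacc, hrec, hshift]
          simp [strsS, List.filterMap_append, e4]
      · by_cases hc2 : s[i] = ')'
        · rw [loopA.eq_def, dif_pos hlt, if_neg hc1, if_pos hc2, if_pos (by norm_num)]
          rw [loopB2.eq_def, dif_pos hlt, if_neg hc1, if_pos hc2]
          exact hacc
        · rw [loopA.eq_def, dif_pos hlt, if_neg hc1, if_neg hc2]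
          rw [loopB2.eq_def, dif_pos hlt, if_neg hc1, if_neg hc2]
          exact ih (i+1) D acc beg (by omega) (by omega) hacc
    · rw [loopA.eq_def, dif_neg hlt, loopB2.eq_def, dif_neg hlt]
      simpa [postSpans] using hacc

lemma extractA_eq_altCore : ∀ (f : Nat) (s : List Char), s.length ≤ f →
    extractA (f+1) s = altCore s := by
  intro f
  induction f with
  | zero =>
    intro s hs
    rw [extractA]
    exact mainLoop s 0 (fun ch hch => absurd hch (by omega)) s.length 1 [] [s] 0
      (le_refl 1) (by omega) rfl
  | succ f ih =>
    intro s hs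
    rw [extractA]
    exact mainLoop s (f+1) (fun ch hch => ih ch (by omega)) s.length 1 [] [s] 0
      (le_refl 1) (by omega) rfl

-- ===== VERDICT (by name: the statement is the Claim_ definition above) =====
-- filterMap commutes with postfixing String.ofList
lemma filterMap_ofList (s : List Char) (sp : List (Option (Nat × Nat))) :
    (strsS s sp).map String.ofList
      = sp.filterMap (fun o => o.map (fun be => String.ofList ((s.drop be.1).take (be.2 - be.1)))) := by
  induction sp with
  | nil => rfl
  | cons hd tl ih =>
    cases hd <;> simp_all [strsS]

theorem extract_subtrees_spec : Claim_equal_extract_subtrees := by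
  intro t _
  simp only [Spec_extract_subtrees, extract_subtrees, extract_subtrees_alt]
  rw [extractA_eq_altCore t.toList.length t.toList (le_refl _)]
  rw [altCore]
  rw [loopB_eq_B2]
  simp only [List.map_cons]
  rw [filterMap_ofList]
  congr 1
  simp
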